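-- pv_equiv track=rewrite | github.com/KIParla/tools | normalize.py | check_angular_parentheses
-- ===== SOURCE A (Python) =====
-- def check_angular_parentheses(annotation: str) -> bool:
--     """Return True if <...> (slow) and >...< (fast) pace markers are balanced."""
--     fast = False
--     slow = False
--     for ch in annotation:
--         if ch == "<":
--             if fast:
--                 fast = False
--             elif not slow:
--                 slow = True
--             else:
--                 return False  # nested slow
--         elif ch == ">":
--             if slow:
--                 slow = False
--             elif not fast:
--                 fast = True
--             else:
--                 return False  # nested fast
--     return not fast and not slow
-- ===== SOURCE B (Python) =====
-- def check_angular_parentheses(annotation: str) -> bool: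
--     """Return True if <...> (slow) and >...< (fast) pace markers are balanced."""
--     brackets = [c for c in annotation if c in "<>"]
--     it = iter(brackets)
--     return len(brackets) % 2 == 0 and all(a != b for a, b in zip(it, it))
-- ===== Notes on version B (the rewrite author's own statement) =====
-- stated objective: simpler
-- what changed: Replaces the stateful fast/slow two-flag scanner with early returns by filtering out the bracket characters and checking that they pair up into consecutive distinct pairs.
import Mathlib
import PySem

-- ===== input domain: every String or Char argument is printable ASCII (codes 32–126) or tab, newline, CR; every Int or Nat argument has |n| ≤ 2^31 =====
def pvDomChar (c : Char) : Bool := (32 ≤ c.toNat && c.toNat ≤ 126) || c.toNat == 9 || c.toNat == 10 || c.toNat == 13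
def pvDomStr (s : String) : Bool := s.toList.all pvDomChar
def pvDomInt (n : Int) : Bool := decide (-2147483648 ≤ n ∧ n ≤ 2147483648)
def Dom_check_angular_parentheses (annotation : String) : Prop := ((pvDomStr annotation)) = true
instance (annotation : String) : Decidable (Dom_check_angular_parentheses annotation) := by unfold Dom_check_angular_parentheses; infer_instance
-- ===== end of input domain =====

-- B replaces A's stateful fast/slow flag machine by filtering the bracket characters and checking consecutive pairs differ (simpler decomposition, same cost).


-- ===== PORT A =====
def checkLoop : List Char → Bool → Bool → Bool
  | [], fast, slow => !fast && !slow
  | c :: rest, fast, slow =>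
    if c = '<' then
      if fast then checkLoop rest false slow
      else if !slow then checkLoop rest fast true
      else false
    else if c = '>' then
      if slow then checkLoop rest fast false
      else if !fast then checkLoop rest true slow
      else false
    else checkLoop rest fast slow

def check_angular_parentheses (annotation : String) : Bool :=
  checkLoop annotation.toList false false

-- ===== PORT B =====
-- zip(it, it) over the filtered brackets pairs consecutive elements, dropping an unpaired leftover
def toPairs : List Char → List (Char × Char)
  | a :: b :: rest => (a, b) :: toPairs rest
  | _ => []

def check_angular_parentheses_alt (annotation : String) : Bool :=
  let brackets := annotation.toList.filter (fun c => c = '<' ∨ c = '>')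
  decide (brackets.length % 2 = 0) && (toPairs brackets).all (fun p => p.1 != p.2)

-- ===== PRECONDITION & SPEC =====
def Spec_check_angular_parentheses (annotation : String) (out : Bool) : Prop := out = check_angular_parentheses_alt annotation
instance (annotation : String) (out : Bool) : Decidable (Spec_check_angular_parentheses annotation out) := by unfold Spec_check_angular_parentheses; infer_instance

-- ===== CLAIM (what is proved, stated in full; the proofs are below) =====
def Claim_equal_check_angular_parentheses : Prop := ∀ (annotation : String), Dom_check_angular_parentheses annotation → Spec_check_angular_parentheses annotation (check_angular_parentheses annotation)

-- ===== LEMMAS AND PROOFS =====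

-- proof-side helper: the pair check written as a single two-at-a-time recursion
def pairsOk : List Char → Bool
  | [] => true
  | [_] => false
  | a :: b :: rest => (a != b) && pairsOk rest

lemma pairsOk_eq (l : List Char) :
    pairsOk l = (decide (l.length % 2 = 0) && (toPairs l).all (fun p => p.1 != p.2)) := by
  induction l using pairsOk.induct with
  | case1 => simp [pairsOk, toPairs]
  | case2 => simp [pairsOk, toPairs]
  | case3 a b rest ih =>
    simp only [pairsOk, toPairs, List.all_cons, List.length_cons, ih]
    have h2 : (rest.length + 1 + 1) % 2 = rest.length % 2 := by omega
    simp only [h2, Bool.and_left_comm]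

lemma checkLoop_eq (cs : List Char) :
    checkLoop cs false false = pairsOk (cs.filter (fun c => c = '<' ∨ c = '>'))
    ∧ checkLoop cs false true = pairsOk ('<' :: cs.filter (fun c => c = '<' ∨ c = '>'))
    ∧ checkLoop cs true false = pairsOk ('>' :: cs.filter (fun c => c = '<' ∨ c = '>')) := by
  induction cs with
  | nil => simp [checkLoop, pairsOk]
  | cons c rest ih =>
    obtain ⟨ih0, ihs, ihf⟩ := ih
    by_cases h1 : c = '<'
    · subst h1
      refine ⟨?_, ?_, ?_⟩ <;>
        simp [checkLoop, List.filter, pairsOk, ih0, ihs, ihf]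
    · by_cases h2 : c = '>'
      · subst h2
        refine ⟨?_, ?_, ?_⟩ <;>
          simp [checkLoop, List.filter, pairsOk, ih0, ihs, ihf]
      · refine ⟨?_, ?_, ?_⟩ <;>
          simp [checkLoop, List.filter, pairsOk, ih0, ihs, ihf, h1, h2]

-- ===== VERDICT (by name: the statement is the Claim_ definition above) =====
theorem check_angular_parentheses_spec : Claim_equal_check_angular_parentheses := by
  intro annotation _
  unfold Spec_check_angular_parentheses check_angular_parentheses check_angular_parentheses_alt
  rw [(checkLoop_eq annotation.toList).1, pairsOk_eq]
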